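-- pv_equiv track=rewrite | github.com/MrJujek/agh | asd/old_exams/23-24/egz2/A/egz2a.py | wired
-- ===== SOURCE A (Python) =====
-- def wired(T):
--   n = len(T)
--   if n == 0:
--     return 0
--
--   memo = [[-1] * n for _ in range(n)]
--
--   def solve(i, j):
--     if i >= j:
--       return 0
--
--     if memo[i][j] != -1:
--       return memo[i][j]
--
--     minCost = float("inf")
--     for k in range(i + 1, j + 1, 2):
--       curr = 1 + abs(T[i] - T[k]) + solve(i + 1, k - 1) + solve(k + 1, j)
--       minCost = min(minCost, curr)
--
--     memo[i][j] = minCost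
--     return memo[i][j]
--
--   return solve(0, n - 1)
-- ===== SOURCE B (Python) =====
-- def wired(T):
--   n = len(T)
--   if n == 0:
--     return 0
--   # dp has one extra all-zero row so dp[k + 1][j] is defined when k == j
--   dp = [[0] * n for _ in range(n + 1)]
--   for g in range(1, n):
--     for i in range(n - g):
--       j = i + g
--       best = None
--       for k in range(i + 1, j + 1, 2):
--         curr = 1 + abs(T[i] - T[k]) + dp[i + 1][k - 1] + dp[k + 1][j]
--         if best is None or curr < best:
--           best = curr
--       dp[i][j] = best
--   return dp[0][n - 1]
-- ===== Notes on version B (the rewrite author's own statement) =====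
-- stated objective: alternative
-- what changed: Replaces A's top-down memoized recursion (solve with a memo table and recursive calls) by an explicit bottom-up tabulation that fills dp[i][j] in increasing interval-length order, so no recursion and no memo sentinel are needed.
import Mathlib
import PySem

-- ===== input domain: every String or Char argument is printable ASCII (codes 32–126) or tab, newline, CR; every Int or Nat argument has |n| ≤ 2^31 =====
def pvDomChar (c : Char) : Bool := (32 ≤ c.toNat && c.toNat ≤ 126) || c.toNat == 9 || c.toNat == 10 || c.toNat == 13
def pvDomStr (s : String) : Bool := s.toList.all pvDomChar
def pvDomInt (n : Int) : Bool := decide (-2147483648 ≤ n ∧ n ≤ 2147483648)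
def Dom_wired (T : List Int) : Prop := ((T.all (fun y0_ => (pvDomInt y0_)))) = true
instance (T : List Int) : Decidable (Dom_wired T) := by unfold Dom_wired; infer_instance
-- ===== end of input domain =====

-- B replaces A's top-down memoized recursion by a bottom-up, gap-ordered table fill of
-- the same recurrence (alternative decomposition; similar cost).

-- ===== PORT A =====
-- T[i]: every index used by either program is provably in range 0..len(T)-1, so the
-- defaulted read is exact here.
def pyAt (T : List Int) (i : Int) : Int := (PySem.List.pyGet? T i).getD 0

-- memo[i][j] read / write; every access in A has 0 ≤ i, 0 ≤ j, so plain (non-wrapping)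
-- Nat indexing is exact here.
def mget (m : List (List Int)) (i j : Int) : Int := (m.getD i.toNat []).getD j.toNat (-1)

def mset (m : List (List Int)) (i j v : Int) : List (List Int) :=
  m.set i.toNat ((m.getD i.toNat []).set j.toNat v)

-- solve(i, j), with the mutable memo threaded through as explicit state and a fuel
-- argument for termination (fuel = len(T) at the top call is enough: each recursive
-- call shrinks j - i).  minCost is Option Int: 'none' models float('inf'); since the
-- k-loop runs at least once whenever i < j, the stored value is never 'none', so
-- '.getD 0' is never hit (Python's inf never escapes either).
def solveA (T : List Int) : Nat → List (List Int) → Int → Int → Int × List (List Int)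
  | 0, m, _, _ => (0, m)
  | fuel+1, m, i, j =>
    if i ≥ j then (0, m)
    else if mget m i j ≠ -1 then (mget m i j, m)
    else
      let r := (PySem.List.pyRange (i+1) (j+1) 2).foldl
        (fun (st : Option Int × List (List Int)) k =>
          let p1 := solveA T fuel st.2 (i+1) (k-1)
          let p2 := solveA T fuel p1.2 (k+1) j
          let curr := 1 + |pyAt T i - pyAt T k| + p1.1 + p2.1
          (some (match st.1 with | none => curr | some mc => min mc curr), p2.2))
        (none, m)
      let v := r.1.getD 0
      -- 'memo[i][j] = minCost; return memo[i][j]' : the value returned is the one just stored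
      (v, mset r.2 i j v)

def wired (T : List Int) : Int :=
  let n : Int := T.length
  if n = 0 then 0
  else (solveA T T.length (List.replicate T.length (List.replicate T.length (-1))) 0 (n - 1)).1

-- ===== PORT B =====
-- dp[i][j] read / write (defaults 0; indices are in range at every access of B).
def dget (m : List (List Int)) (i j : Int) : Int := (m.getD i.toNat []).getD j.toNat 0

def wired_alt (T : List Int) : Int :=
  let n : Int := T.length
  if n = 0 then 0
  else
    let dp0 := List.replicate (T.length + 1) (List.replicate T.length (0 : Int))
    let dp := (PySem.List.pyRange 1 n 1).foldl (fun dp g =>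
      (PySem.List.pyRange 0 (n - g) 1).foldl (fun dp i =>
        let j := i + g
        let best := (PySem.List.pyRange (i+1) (j+1) 2).foldl
          (fun (best : Option Int) k =>
            let curr := 1 + |pyAt T i - pyAt T k| + dget dp (i+1) (k-1) + dget dp (k+1) j
            match best with
            | none => some curr
            | some b => if curr < b then some curr else some b)
          none
        -- 'dp[i][j] = best': best is never None here (the k-loop runs at least once)
        mset dp i j (best.getD 0)) dp) dp0
    dget dp 0 (n - 1)

-- ===== PRECONDITION & SPEC =====
def Spec_wired (T : List Int) (out : Int) : Prop := out = wired_alt T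
instance (T : List Int) (out : Int) : Decidable (Spec_wired T out) := by unfold Spec_wired; infer_instance

-- ===== CLAIM (what is proved, stated in full; the proofs are below) =====
def Claim_equal_wired : Prop := ∀ (T : List Int), Dom_wired T → Spec_wired T (wired T)

-- ===== LEMMAS AND PROOFS =====

-- The common functional specification: the pure recurrence both programs compute.
def F (T : List Int) (i j : Int) : Int :=
  if i ≥ j then 0
  else
    (((PySem.List.pyRange (i+1) (j+1) 2).attach.foldl
      (fun (mc : Option Int) k =>
        some (match mc with
          | none => 1 + |pyAt T i - pyAt T k.1| + F T (i+1) (k.1-1) + F T (k.1+1) j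
          | some m => min m (1 + |pyAt T i - pyAt T k.1| + F T (i+1) (k.1-1) + F T (k.1+1) j)))
      none).getD 0)
termination_by (j - i).toNat
decreasing_by
  · have h := (PySem.List.mem_pyRange_iff_of_pos (by norm_num) k.1).1 k.2
    omega
  · have h := (PySem.List.mem_pyRange_iff_of_pos (by norm_num) k.1).1 k.2
    omega

theorem F_of_ge {T : List Int} {i j : Int} (h : i ≥ j) : F T i j = 0 := by
  rw [F]; simp [h]

theorem F_of_lt {T : List Int} {i j : Int} (h : i < j) :
    F T i j =
      ((PySem.List.pyRange (i+1) (j+1) 2).foldl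
        (fun (mc : Option Int) k =>
          some (match mc with
            | none => 1 + |pyAt T i - pyAt T k| + F T (i+1) (k-1) + F T (k+1) j
            | some m => min m (1 + |pyAt T i - pyAt T k| + F T (i+1) (k-1) + F T (k+1) j)))
        none).getD 0 := by
  rw [F, if_neg (by omega),
    List.foldl_attach (f := fun (mc : Option Int) k =>
      some (match mc with
        | none => 1 + |pyAt T i - pyAt T k| + F T (i+1) (k-1) + F T (k+1) j
        | some m => min m (1 + |pyAt T i - pyAt T k| + F T (i+1) (k-1) + F T (k+1) j)))]

-- ----- memo-cell lemmas -----
theorem getD_set_ne {α : Type} {r : List α} {p q : Nat} {v : α} {d : α} (h : q ≠ p) :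
    (r.set p v).getD q d = r.getD q d := by
  simp only [List.getD_eq_getElem?_getD, List.getElem?_set]
  rw [if_neg (Ne.symm h)]

theorem cell_set_ne {m : List (List Int)} {i j a b v : Int} {d : Int}
    (hi : 0 ≤ i) (hj : 0 ≤ j) (ha : 0 ≤ a) (hb : 0 ≤ b) (hne : ¬(a = i ∧ b = j)) :
    ((mset m i j v).getD a.toNat []).getD b.toNat d = (m.getD a.toNat []).getD b.toNat d := by
  unfold mset
  rcases Decidable.em (a = i) with h | h
  · subst h
    have hbj : b.toNat ≠ j.toNat := by omega
    rcases Nat.lt_or_ge a.toNat m.length with hlt | hge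
    · rw [List.getD_eq_getElem?_getD (l := m.set _ _), List.getElem?_set_self hlt]
      simp only [Option.getD_some, getD_set_ne hbj, List.getD_eq_getElem?_getD]
    · rw [List.set_eq_of_length_le (by omega)]
  · have hai : a.toNat ≠ i.toNat := by omega
    rw [getD_set_ne hai]

theorem mget_mset_ne {m : List (List Int)} {i j a b v : Int}
    (hi : 0 ≤ i) (hj : 0 ≤ j) (ha : 0 ≤ a) (hb : 0 ≤ b) (hne : ¬(a = i ∧ b = j)) :
    mget (mset m i j v) a b = mget m a b := cell_set_ne hi hj ha hb hne

theorem dget_mset_ne {m : List (List Int)} {i j a b v : Int}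
    (hi : 0 ≤ i) (hj : 0 ≤ j) (ha : 0 ≤ a) (hb : 0 ≤ b) (hne : ¬(a = i ∧ b = j)) :
    dget (mset m i j v) a b = dget m a b := cell_set_ne hi hj ha hb hne

theorem mget_mset_self {m : List (List Int)} {i j v : Int} :
    mget (mset m i j v) i j = v ∨ mget (mset m i j v) i j = mget m i j := by
  unfold mget mset
  rcases Nat.lt_or_ge i.toNat m.length with h | h
  · rw [List.getD_eq_getElem?_getD (l := m.set _ _), List.getElem?_set_self h, Option.getD_some]
    rcases Nat.lt_or_ge j.toNat (m.getD i.toNat []).length with h2 | h2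
    · left
      rw [List.getD_eq_getElem?_getD, List.getElem?_set_self h2, Option.getD_some]
    · right
      rw [List.set_eq_of_length_le (by omega)]
  · right
    rw [List.set_eq_of_length_le (by omega)]

theorem dget_mset_self {m : List (List Int)} {i j v : Int}
    (h1 : i.toNat < m.length) (h2 : j.toNat < (m.getD i.toNat []).length) :
    dget (mset m i j v) i j = v := by
  unfold dget mset
  rw [List.getD_eq_getElem?_getD (l := m.set _ _), List.getElem?_set_self h1, Option.getD_some,
    List.getD_eq_getElem?_getD, List.getElem?_set_self h2, Option.getD_some]

-- ----- A-side: solveA computes F, under the memo invariant -----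
def InvA (T : List Int) (m : List (List Int)) : Prop :=
  ∀ a b : Int, 0 ≤ a → 0 ≤ b → mget m a b ≠ -1 → mget m a b = F T a b

-- the body of A's k-loop / of the spec's k-fold, named for the proofs
def stepA (T : List Int) (fuel : Nat) (i j : Int) :
    Option Int × List (List Int) → Int → Option Int × List (List Int) :=
  fun st k =>
    let p1 := solveA T fuel st.2 (i+1) (k-1)
    let p2 := solveA T fuel p1.2 (k+1) j
    let curr := 1 + |pyAt T i - pyAt T k| + p1.1 + p2.1
    (some (match st.1 with | none => curr | some mc => min mc curr), p2.2)

def stepF (T : List Int) (i j : Int) : Option Int → Int → Option Int :=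
  fun mc k =>
    some (match mc with
      | none => 1 + |pyAt T i - pyAt T k| + F T (i+1) (k-1) + F T (k+1) j
      | some m => min m (1 + |pyAt T i - pyAt T k| + F T (i+1) (k-1) + F T (k+1) j))

theorem solveA_succ (T : List Int) (fuel : Nat) (m : List (List Int)) (i j : Int) :
    solveA T (fuel+1) m i j =
      if i ≥ j then (0, m)
      else if mget m i j ≠ -1 then (mget m i j, m)
      else
        (((PySem.List.pyRange (i+1) (j+1) 2).foldl (stepA T fuel i j) (none, m)).1.getD 0,
          mset ((PySem.List.pyRange (i+1) (j+1) 2).foldl (stepA T fuel i j) (none, m)).2 i j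
            (((PySem.List.pyRange (i+1) (j+1) 2).foldl (stepA T fuel i j) (none, m)).1.getD 0)) := rfl

theorem F_of_lt_step {T : List Int} {i j : Int} (h : i < j) :
    F T i j = ((PySem.List.pyRange (i+1) (j+1) 2).foldl (stepF T i j) none).getD 0 := F_of_lt h

theorem loopA (T : List Int) (fuel : Nat) (i j : Int) (hi : 0 ≤ i) (hij : i < j)
    (hfuel : (j - i).toNat ≤ fuel)
    (IH : ∀ (i' j' : Int) (m : List (List Int)), 0 ≤ i' → (j' - i').toNat < fuel → InvA T m →
      (solveA T fuel m i' j').1 = F T i' j' ∧ InvA T (solveA T fuel m i' j').2) :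
    ∀ (ks : List Int) (m : List (List Int)) (mc : Option Int),
      (∀ k ∈ ks, i + 1 ≤ k ∧ k ≤ j) → InvA T m →
      (ks.foldl (stepA T fuel i j) (mc, m)).1 = ks.foldl (stepF T i j) mc
        ∧ InvA T (ks.foldl (stepA T fuel i j) (mc, m)).2 := by
  intro ks
  induction ks with
  | nil => intro m mc _ hm; exact ⟨rfl, hm⟩
  | cons k ks ih =>
    intro m mc hb hm
    obtain ⟨hk1, hk2⟩ := hb k (List.mem_cons_self)
    have h1 := IH (i+1) (k-1) m (by omega) (by omega) hm
    have h2 := IH (k+1) j (solveA T fuel m (i+1) (k-1)).2 (by omega) (by omega) h1.2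
    have hstep : stepA T fuel i j (mc, m) k =
        (stepF T i j mc k, (solveA T fuel (solveA T fuel m (i+1) (k-1)).2 (k+1) j).2) := by
      unfold stepA stepF
      dsimp only
      rw [h1.1, h2.1]
    rw [List.foldl_cons, List.foldl_cons, hstep]
    exact ih _ _ (fun k' hk' => hb k' (List.mem_cons_of_mem _ hk')) h2.2

theorem solveA_correct (T : List Int) :
    ∀ (fuel : Nat) (i j : Int) (m : List (List Int)), 0 ≤ i → (j - i).toNat < fuel →
      InvA T m → (solveA T fuel m i j).1 = F T i j ∧ InvA T (solveA T fuel m i j).2 := by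
  intro fuel
  induction fuel with
  | zero => intro i j m _ h _; omega
  | succ fuel IH =>
    intro i j m hi hfuel hm
    rw [solveA_succ]
    by_cases hge : i ≥ j
    · rw [if_pos hge]
      exact ⟨(F_of_ge hge).symm, hm⟩
    · rw [if_neg hge]
      have hij : i < j := by omega
      by_cases hc : mget m i j ≠ -1
      · rw [if_pos hc]
        exact ⟨hm i j hi (by omega) hc, hm⟩
      · rw [if_neg hc]
        have hbnds : ∀ k ∈ PySem.List.pyRange (i+1) (j+1) 2, i + 1 ≤ k ∧ k ≤ j := by
          intro k hk
          have := (PySem.List.mem_pyRange_iff_of_pos (by norm_num) k).1 hk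
          omega
        have hl := loopA T fuel i j hi hij (by omega) IH
          (PySem.List.pyRange (i+1) (j+1) 2) m none hbnds hm
        constructor
        · dsimp only
          rw [hl.1, F_of_lt_step hij]
        · dsimp only
          intro a b ha hb hne
          by_cases hab : a = i ∧ b = j
          · obtain ⟨rfl, rfl⟩ := hab
            rcases mget_mset_self (m := (List.foldl (stepA T fuel a b) (none, m)
                (PySem.List.pyRange (a+1) (b+1) 2)).2) (v := ((List.foldl (stepA T fuel a b) (none, m)
                (PySem.List.pyRange (a+1) (b+1) 2)).1.getD 0)) with hs | hs
            · rw [hs] at hne ⊢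
              rw [hl.1, F_of_lt_step hij]
            · rw [hs] at hne ⊢
              exact hl.2 a b ha hb hne
          · rw [mget_mset_ne hi (by omega) ha hb hab] at hne ⊢
            exact hl.2 a b ha hb hne

-- ----- B-side: the table invariant -----
def Shape (T : List Int) (m : List (List Int)) : Prop :=
  m.length = T.length + 1 ∧ ∀ r ∈ m, r.length = T.length

def InvB (T : List Int) (m : List (List Int)) (g i : Int) : Prop :=
  ∀ a b : Int, 0 ≤ a → 0 ≤ b → b < (T.length : Int) →
    dget m a b = if b - a < g ∨ (b - a = g ∧ a < i) then F T a b else 0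

theorem mget_init {p q : Nat} {a b : Int} :
    mget (List.replicate p (List.replicate q (-1))) a b = -1 := by
  unfold mget
  simp only [List.getD_eq_getElem?_getD, List.getElem?_replicate]
  by_cases h1 : a.toNat < p
  · by_cases h2 : b.toNat < q <;> simp [h1, h2]
  · simp [h1]

theorem wiredA_eq_F (T : List Int) : wired T = F T 0 ((T.length : Int) - 1) := by
  unfold wired
  by_cases h : (T.length : Int) = 0
  · rw [if_pos h, F_of_ge (by omega)]
  · rw [if_neg h]
    exact (solveA_correct T T.length 0 ((T.length : Int) - 1) _ le_rfl (by omega)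
      (fun a b _ _ hne => absurd mget_init hne)).1

-- ----- B-side proofs -----
-- the body of B's k-loop / i-loop, named for the proofs
def stepBk (T : List Int) (dp : List (List Int)) (i j : Int) : Option Int → Int → Option Int :=
  fun best k =>
    let curr := 1 + |pyAt T i - pyAt T k| + dget dp (i+1) (k-1) + dget dp (k+1) j
    match best with
    | none => some curr
    | some b => if curr < b then some curr else some b

def stepB (T : List Int) (g : Int) : List (List Int) → Int → List (List Int) :=
  fun dp i =>
    mset dp i (i+g)
      (((PySem.List.pyRange (i+1) (i+g+1) 2).foldl (stepBk T dp i (i+g)) none).getD 0)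

theorem wired_alt_eq (T : List Int) :
    wired_alt T =
      if (T.length : Int) = 0 then 0
      else
        dget ((PySem.List.pyRange 1 (T.length : Int) 1).foldl
          (fun dp g => (PySem.List.pyRange 0 ((T.length : Int) - g) 1).foldl (stepB T g) dp)
          (List.replicate (T.length + 1) (List.replicate T.length (0 : Int)))) 0
          ((T.length : Int) - 1) := rfl

theorem dget_init {T : List Int} {a b : Int} :
    dget (List.replicate (T.length + 1) (List.replicate T.length (0 : Int))) a b = 0 := by
  unfold dget
  simp only [List.getD_eq_getElem?_getD, List.getElem?_replicate]
  by_cases h1 : a.toNat < T.length + 1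
  · by_cases h2 : b.toNat < T.length <;> simp [h1, h2]
  · simp [h1]

theorem stepBk_eq_stepF {T : List Int} {dp : List (List Int)} {g i : Int}
    (hg : 1 ≤ g) (hi : 0 ≤ i) (hin : i + g < (T.length : Int))
    (hInv : InvB T dp g i) :
    ∀ (ks : List Int) (mc : Option Int), (∀ k ∈ ks, i + 1 ≤ k ∧ k ≤ i + g) →
      ks.foldl (stepBk T dp i (i+g)) mc = ks.foldl (stepF T i (i+g)) mc := by
  intro ks
  induction ks with
  | nil => intro mc _; rfl
  | cons k ks ih =>
    intro mc hb
    obtain ⟨hk1, hk2⟩ := hb k (List.mem_cons_self)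
    have e1 : dget dp (i+1) (k-1) = F T (i+1) (k-1) := by
      rw [hInv (i+1) (k-1) (by omega) (by omega) (by omega), if_pos (by omega)]
    have e2 : dget dp (k+1) (i+g) = F T (k+1) (i+g) := by
      rw [hInv (k+1) (i+g) (by omega) (by omega) (by omega), if_pos (by omega)]
    have hstep : stepBk T dp i (i+g) mc k = stepF T i (i+g) mc k := by
      unfold stepBk stepF
      dsimp only
      rw [e1, e2]
      cases mc with
      | none => rfl
      | some b =>
        dsimp only
        rw [min_def]
        split_ifs <;> simp <;> omega
    rw [List.foldl_cons, List.foldl_cons, hstep]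
    exact ih _ (fun k' hk' => hb k' (List.mem_cons_of_mem _ hk'))

theorem stepB_inv {T : List Int} {dp : List (List Int)} {g i : Int}
    (hg : 1 ≤ g) (hi : 0 ≤ i) (hin : i + g < (T.length : Int))
    (hS : Shape T dp) (hInv : InvB T dp g i) :
    Shape T (stepB T g dp i) ∧ InvB T (stepB T g dp i) g (i + 1) := by
  have hrow : (dp.getD i.toNat []).length = T.length := by
    have hlen : i.toNat < dp.length := by have := hS.1; omega
    rw [List.getD_eq_getElem?_getD, List.getElem?_eq_getElem hlen, Option.getD_some]
    exact hS.2 _ (List.getElem_mem hlen)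
  have hbest : ((PySem.List.pyRange (i+1) (i+g+1) 2).foldl (stepBk T dp i (i+g)) none).getD 0
      = F T i (i+g) := by
    rw [stepBk_eq_stepF hg hi hin hInv _ none (by
      intro k hk
      have := (PySem.List.mem_pyRange_iff_of_pos (by norm_num) k).1 hk
      omega)]
    exact (F_of_lt_step (by omega)).symm
  constructor
  · unfold stepB mset
    refine ⟨by rw [List.length_set]; exact hS.1, ?_⟩
    intro r hr
    rcases List.mem_or_eq_of_mem_set hr with h | h
    · exact hS.2 _ h
    · rw [h, List.length_set]
      exact hrow
  · intro a b ha hb hbn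
    unfold stepB
    by_cases hab : a = i ∧ b = i + g
    · obtain ⟨rfl, rfl⟩ := hab
      rw [dget_mset_self (by have := hS.1; omega) (by have := hrow; omega), hbest,
        if_pos (by omega)]
    · rw [dget_mset_ne hi (by omega) ha hb hab, hInv a b ha hb hbn]
      have hcond : (b - a < g ∨ (b - a = g ∧ a < i + 1)) ↔ (b - a < g ∨ (b - a = g ∧ a < i)) := by
        omega
      by_cases hc : b - a < g ∨ (b - a = g ∧ a < i)
      · rw [if_pos hc, if_pos (hcond.2 hc)]
      · rw [if_neg hc, if_neg (fun hh => hc (hcond.1 hh))]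

theorem innerB_inv {T : List Int} {g : Int} (hg : 1 ≤ g) :
    ∀ (cnt : Nat) (i0 : Int) (dp : List (List Int)), (((T.length : Int) - g) - i0).toNat = cnt →
      0 ≤ i0 → i0 ≤ (T.length : Int) - g → Shape T dp → InvB T dp g i0 →
      Shape T ((PySem.List.pyRange i0 ((T.length : Int) - g) 1).foldl (stepB T g) dp) ∧
      InvB T ((PySem.List.pyRange i0 ((T.length : Int) - g) 1).foldl (stepB T g) dp) g
        ((T.length : Int) - g) := by
  intro cnt
  induction cnt with
  | zero =>
    intro i0 dp hcnt hi0 hi0' hS hInv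
    rw [PySem.List.pyRange_one_eq_nil (by omega), List.foldl_nil]
    refine ⟨hS, fun a b ha hb hbn => ?_⟩
    rw [hInv a b ha hb hbn]
    have hcond : (b - a < g ∨ (b - a = g ∧ a < (T.length : Int) - g)) ↔
        (b - a < g ∨ (b - a = g ∧ a < i0)) := by omega
    by_cases hc : b - a < g ∨ (b - a = g ∧ a < i0)
    · rw [if_pos hc, if_pos (hcond.2 hc)]
    · rw [if_neg hc, if_neg (fun hh => hc (hcond.1 hh))]
  | succ cnt ih =>
    intro i0 dp hcnt hi0 hi0' hS hInv
    rw [PySem.List.pyRange_one_cons (by omega), List.foldl_cons]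
    obtain ⟨hS', hInv'⟩ := stepB_inv hg hi0 (by omega) hS hInv
    exact ih (i0+1) _ (by omega) (by omega) (by omega) hS' hInv'

theorem outerB_inv (T : List Int) :
    ∀ (cnt : Nat) (g0 : Int) (dp : List (List Int)), ((T.length : Int) - g0).toNat = cnt →
      1 ≤ g0 → Shape T dp → InvB T dp g0 0 →
      InvB T ((PySem.List.pyRange g0 (T.length : Int) 1).foldl
        (fun dp g => (PySem.List.pyRange 0 ((T.length : Int) - g) 1).foldl (stepB T g) dp) dp)
        (T.length : Int) 0 := by
  intro cnt
  induction cnt with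
  | zero =>
    intro g0 dp hcnt hg0 hS hInv
    rw [PySem.List.pyRange_one_eq_nil (by omega), List.foldl_nil]
    intro a b ha hb hbn
    rw [hInv a b ha hb hbn]
    have hcond : (b - a < (T.length : Int) ∨ (b - a = (T.length : Int) ∧ a < 0)) ↔
        (b - a < g0 ∨ (b - a = g0 ∧ a < 0)) := by omega
    by_cases hc : b - a < g0 ∨ (b - a = g0 ∧ a < 0)
    · rw [if_pos hc, if_pos (hcond.2 hc)]
    · rw [if_neg hc, if_neg (fun hh => hc (hcond.1 hh))]
  | succ cnt ih =>
    intro g0 dp hcnt hg0 hS hInv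
    rw [PySem.List.pyRange_one_cons (by omega), List.foldl_cons]
    obtain ⟨hS', hInv'⟩ := innerB_inv hg0 ((((T.length : Int) - g0) - 0).toNat) 0 dp rfl
      le_rfl (by omega) hS hInv
    refine ih (g0+1) _ (by omega) (by omega) hS' ?_
    intro a b ha hb hbn
    rw [hInv' a b ha hb hbn]
    have hcond : (b - a < g0 + 1 ∨ (b - a = g0 + 1 ∧ a < 0)) ↔
        (b - a < g0 ∨ (b - a = g0 ∧ a < (T.length : Int) - g0)) := by omega
    by_cases hc : b - a < g0 ∨ (b - a = g0 ∧ a < (T.length : Int) - g0)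
    · rw [if_pos hc, if_pos (hcond.2 hc)]
    · rw [if_neg hc, if_neg (fun hh => hc (hcond.1 hh))]

theorem wiredB_eq_F (T : List Int) : wired_alt T = F T 0 ((T.length : Int) - 1) := by
  rw [wired_alt_eq]
  by_cases h : (T.length : Int) = 0
  · rw [if_pos h, F_of_ge (by omega)]
  · rw [if_neg h]
    have hS0 : Shape T (List.replicate (T.length + 1) (List.replicate T.length (0 : Int))) := by
      refine ⟨List.length_replicate, fun r hr => ?_⟩
      rw [List.eq_of_mem_replicate hr]
      exact List.length_replicate
    have hInv0 : InvB T (List.replicate (T.length + 1) (List.replicate T.length (0 : Int))) 1 0 := by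
      intro a b ha hb hbn
      rw [dget_init]
      by_cases hc : b - a < 1 ∨ (b - a = 1 ∧ a < 0)
      · rw [if_pos hc, F_of_ge (by omega)]
      · rw [if_neg hc]
    have := outerB_inv T ((T.length : Int) - 1).toNat 1 _ rfl le_rfl hS0 hInv0
    rw [this 0 ((T.length : Int) - 1) le_rfl (by omega) (by omega), if_pos (by omega)]

-- ===== VERDICT (by name: the statement is the Claim_ definition above) =====
theorem wired_spec : Claim_equal_wired := by
  intro T _
  unfold Spec_wired
  rw [wiredA_eq_F, wiredB_eq_F]
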